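-- pv_equiv track=rewrite | github.com/roryduthie/Hypothesis_Generation | hypothesis_generation.py | remove_duplicate_hypos
-- ===== SOURCE A (Python) =====
-- def remove_duplicate_hypos(overall_hypothesis_list):
--     d = {}
--     for sub in overall_hypothesis_list:
--         hyp_name = sub[0]
--         hyp_id = sub[1]
--         prem = sub[2]
--         sim = sub[4]
--         hyp_name = hyp_name.lower()
--         key_string = str(hyp_name) + str(hyp_id) + str(prem)
--
--         if key_string in d:
--             if sim > d[key_string][4]:
--                 d[key_string] = sub
--         else:
--
--             d[key_string] = sub
--     return list(d.values())
-- ===== SOURCE B (Python) =====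
-- def remove_duplicate_hypos(overall_hypothesis_list):
--     # group-then-reduce: collect all subs per key, then pick the max-sim one per group
--     groups = {}
--     for sub in overall_hypothesis_list:
--         key_string = str(sub[0].lower()) + str(sub[1]) + str(sub[2])
--         groups[key_string] = groups.get(key_string, []) + [sub]
--     return [max(group, key=lambda s: s[4]) for group in groups.values()]
-- ===== Notes on version B (the rewrite author's own statement) =====
-- stated objective: alternative
-- what changed: Replaces the online keep-current-best dict update with a two-pass group-then-reduce decomposition: first build an ordered dict key -> list of all subs with that key, then take max(group, key=s[4]) per group.
import Mathlib
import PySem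

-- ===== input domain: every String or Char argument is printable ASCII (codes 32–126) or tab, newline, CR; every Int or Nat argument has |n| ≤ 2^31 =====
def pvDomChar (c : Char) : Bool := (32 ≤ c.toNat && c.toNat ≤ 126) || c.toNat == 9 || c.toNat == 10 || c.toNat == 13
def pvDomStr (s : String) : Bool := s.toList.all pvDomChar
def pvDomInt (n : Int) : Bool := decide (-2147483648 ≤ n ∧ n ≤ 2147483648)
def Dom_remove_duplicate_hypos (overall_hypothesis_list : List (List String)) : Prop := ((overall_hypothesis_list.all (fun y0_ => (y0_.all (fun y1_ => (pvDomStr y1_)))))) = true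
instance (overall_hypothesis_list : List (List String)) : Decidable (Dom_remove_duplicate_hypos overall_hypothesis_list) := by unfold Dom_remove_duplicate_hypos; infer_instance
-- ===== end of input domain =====

-- B replaces A's online keep-current-best dict update by a two-pass group-then-reduce
-- decomposition (group all subs per key, then take the first maximal element of each group).

-- ===== PORT A =====
def remove_duplicate_hypos (overall_hypothesis_list : List (List String)) : List (List String) :=
  (overall_hypothesis_list.foldl (fun d sub =>
      let hyp_name := PySem.List.pyGetD sub 0 ""
      let hyp_id := PySem.List.pyGetD sub 1 ""
      let prem := PySem.List.pyGetD sub 2 ""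
      let sim := PySem.List.pyGetD sub 4 ""
      let hyp_name := PySem.Str.lower hyp_name
      let key_string := hyp_name ++ hyp_id ++ prem
      if d.contains key_string then
        if PySem.List.pyGetD (d.getD key_string []) 4 "" < sim then d.insert key_string sub else d
      else
        d.insert key_string sub)
    PySem.Dict.empty).values

-- ===== PORT B =====
def remove_duplicate_hypos_alt (overall_hypothesis_list : List (List String)) : List (List String) :=
  let groups := overall_hypothesis_list.foldl (fun g sub =>
      let key_string := PySem.Str.lower (PySem.List.pyGetD sub 0 "") ++ PySem.List.pyGetD sub 1 "" ++ PySem.List.pyGetD sub 2 ""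
      g.insert key_string (g.getD key_string [] ++ [sub])) PySem.Dict.empty
  groups.values.filterMap (fun group => PySem.List.max? group (fun s => PySem.List.pyGetD s 4 ""))

-- ===== PRECONDITION & SPEC =====
-- Pre_ excludes exactly the inputs on which Python A raises IndexError (some row shorter than 5,
-- so sub[4] — or an earlier index — does not exist).
def Pre_remove_duplicate_hypos (overall_hypothesis_list : List (List String)) : Prop :=
  ∀ sub ∈ overall_hypothesis_list, 5 ≤ sub.length
instance (overall_hypothesis_list : List (List String)) : Decidable (Pre_remove_duplicate_hypos overall_hypothesis_list) := by unfold Pre_remove_duplicate_hypos; infer_instance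

def pvWitness_remove_duplicate_hypos : List (List String) :=
  [["Hyp A", "1", "p1", "x", "0.9"], ["hyp a", "1", "p1", "y", "0.95"], ["B", "2", "p2", "z", "0.5"]]

def Spec_remove_duplicate_hypos (overall_hypothesis_list : List (List String)) (out : List (List String)) : Prop := out = remove_duplicate_hypos_alt overall_hypothesis_list
instance (overall_hypothesis_list : List (List String)) (out : List (List String)) : Decidable (Spec_remove_duplicate_hypos overall_hypothesis_list out) := by unfold Spec_remove_duplicate_hypos; infer_instance

-- ===== CLAIM (what is proved, stated in full; the proofs are below) =====
def Claim_equal_remove_duplicate_hypos : Prop := ∀ (overall_hypothesis_list : List (List String)), Dom_remove_duplicate_hypos overall_hypothesis_list → Pre_remove_duplicate_hypos overall_hypothesis_list → Spec_remove_duplicate_hypos overall_hypothesis_list (remove_duplicate_hypos overall_hypothesis_list)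

-- ===== LEMMAS AND PROOFS =====

-- the similarity key s[4] and the first maximal element of a group
def pvKey4 (s : List String) : String := PySem.List.pyGetD s 4 ""
def pvBest (g : List (List String)) : List String := (PySem.List.max? g pvKey4).getD []
def pvKeyStr (sub : List String) : String :=
  PySem.Str.lower (PySem.List.pyGetD sub 0 "") ++ PySem.List.pyGetD sub 1 "" ++ PySem.List.pyGetD sub 2 ""

def pvStepA (d : PySem.Dict String (List String)) (sub : List String) : PySem.Dict String (List String) :=
  if d.contains (pvKeyStr sub) then
    if pvKey4 (d.getD (pvKeyStr sub) []) < pvKey4 sub then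
      d.insert (pvKeyStr sub) sub
    else d
  else d.insert (pvKeyStr sub) sub

def pvStepB (g : PySem.Dict String (List (List String))) (sub : List String) : PySem.Dict String (List (List String)) :=
  g.insert (pvKeyStr sub) (g.getD (pvKeyStr sub) [] ++ [sub])

def pvInv (d : PySem.Dict String (List String)) (e : PySem.Dict String (List (List String))) : Prop :=
  e.keys.Nodup ∧ (∀ p ∈ e.items, p.2 ≠ []) ∧
  d.items = e.items.map (fun p => (p.1, pvBest p.2))

theorem pvMax?_eq_best {g : List (List String)} (h : g ≠ []) :
    PySem.List.max? g pvKey4 = some (pvBest g) := by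
  cases hm : PySem.List.max? g pvKey4 with
  | none => exact absurd ((PySem.List.max?_eq_none_iff g pvKey4).mp hm) h
  | some m => simp [pvBest, hm]

theorem pvBest_append_singleton {g : List (List String)} (h : g ≠ []) (x : List String) :
    pvBest (g ++ [x]) = if pvKey4 (pvBest g) < pvKey4 x then x else pvBest g := by
  have hg := pvMax?_eq_best h
  rw [PySem.List.max?] at hg
  rw [pvBest, PySem.List.max?, List.foldl_append, hg]
  show (if pvKey4 (pvBest g) < pvKey4 x then some x else some (pvBest g)).getD []
      = if pvKey4 (pvBest g) < pvKey4 x then x else pvBest g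
  by_cases hlt : pvKey4 (pvBest g) < pvKey4 x
  · rw [if_pos hlt, if_pos hlt]; rfl
  · rw [if_neg hlt, if_neg hlt]; rfl

theorem pvKeys_eq {d : PySem.Dict String (List String)} {e : PySem.Dict String (List (List String))}
    (hit : d.items = e.items.map (fun p => (p.1, pvBest p.2))) : d.keys = e.keys := by
  simp only [PySem.Dict.keys, hit, List.map_map]
  rfl

theorem pvStep_inv {d : PySem.Dict String (List String)} {e : PySem.Dict String (List (List String))} (sub : List String)
    (h : pvInv d e) : pvInv (pvStepA d sub) (pvStepB e sub) := by
  obtain ⟨hnd, hne, hit⟩ := h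
  have hkeys : d.keys = e.keys := pvKeys_eq hit
  have hdnd : d.keys.Nodup := hkeys ▸ hnd
  have hcont : d.contains (pvKeyStr sub) = e.contains (pvKeyStr sub) := by
    rw [PySem.Dict.contains_eq_decide_mem_keys, PySem.Dict.contains_eq_decide_mem_keys, hkeys]
  by_cases hc : e.contains (pvKeyStr sub) = true
  · -- key already present: A maybe replaces the best, B appends to the group
    obtain ⟨g, hg⟩ : ∃ g, e.get? (pvKeyStr sub) = some g := by
      rw [PySem.Dict.contains_eq_isSome_get?] at hc
      exact Option.isSome_iff_exists.mp hc
    have hmemg : (pvKeyStr sub, g) ∈ e.items := PySem.Dict.mem_items_of_get?_eq_some e hg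
    have hgne : g ≠ [] := hne _ hmemg
    have hegD : e.getD (pvKeyStr sub) [] = g := PySem.Dict.getD_of_get?_eq_some e [] hg
    have hdmem : (pvKeyStr sub, pvBest g) ∈ d.items := by
      rw [hit]; exact List.mem_map_of_mem hmemg
    have hdgD : d.getD (pvKeyStr sub) [] = pvBest g :=
      PySem.Dict.getD_of_mem_items d hdmem hdnd []
    have hB : pvStepB e sub = e.insert (pvKeyStr sub) (g ++ [sub]) := by
      rw [pvStepB, hegD]
    have hitemsB : (pvStepB e sub).items
        = e.items.map (fun p => if p.1 == pvKeyStr sub then (pvKeyStr sub, g ++ [sub]) else p) := by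
      rw [hB, PySem.Dict.items_insert_of_contains _ _ hc]
    refine ⟨?_, ?_, ?_⟩
    · rw [hB]; exact PySem.Dict.nodup_keys_insert _ _ _ hnd
    · intro p hp
      rw [hitemsB] at hp
      obtain ⟨q, hq, rfl⟩ := List.mem_map.mp hp
      split
      · simp
      · exact hne _ hq
    · have hbest := pvBest_append_singleton hgne sub
      rw [pvStepA, hcont, if_pos hc, hdgD, hitemsB, List.map_map]
      by_cases hlt : pvKey4 (pvBest g) < pvKey4 sub
      · rw [if_pos hlt,
          PySem.Dict.items_insert_of_contains _ _ (hcont ▸ hc), hit, List.map_map]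
        apply List.map_congr_left
        intro p _
        simp only [Function.comp]
        by_cases hpk : p.1 = pvKeyStr sub
        · simp only [hpk, beq_self_eq_true, if_pos, hbest]
          rw [if_pos hlt]
        · simp [hpk]
      · rw [if_neg hlt, hit]
        apply List.map_congr_left
        intro p hp
        simp only [Function.comp]
        by_cases hpk : p.1 = pvKeyStr sub
        · have : e.get? p.1 = some p.2 := PySem.Dict.get?_of_mem_items e hp hnd
          rw [hpk, hg] at this
          have hp2 : p.2 = g := (Option.some.inj this).symm
          simp only [hpk, beq_self_eq_true, if_pos, hbest, hp2]
          rw [if_neg hlt]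
        · simp [hpk]
  · -- fresh key: both sides append a new entry
    have hc' : e.contains (pvKeyStr sub) = false := by
      cases h' : e.contains (pvKeyStr sub) <;> simp_all
    have hdc : d.contains (pvKeyStr sub) = false := by rw [hcont, hc']
    have hegD : e.getD (pvKeyStr sub) [] = [] := PySem.Dict.getD_of_not_contains e [] hc'
    have hB : pvStepB e sub = e.insert (pvKeyStr sub) [sub] := by
      rw [pvStepB, hegD]; rfl
    refine ⟨?_, ?_, ?_⟩
    · rw [hB]; exact PySem.Dict.nodup_keys_insert _ _ _ hnd
    · intro p hp
      rw [hB, PySem.Dict.items_insert_of_not_contains _ _ hc'] at hp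
      rcases List.mem_append.mp hp with h1 | h1
      · exact hne _ h1
      · simp at h1; subst h1; simp
    · rw [pvStepA, hcont, if_neg (by simp [hc']), hB,
        PySem.Dict.items_insert_of_not_contains _ _ hdc,
        PySem.Dict.items_insert_of_not_contains _ _ hc', hit, List.map_append]
      rfl

theorem pvFold_inv (l : List (List String)) (d : PySem.Dict String (List String)) (e : PySem.Dict String (List (List String)))
    (h : pvInv d e) : pvInv (l.foldl pvStepA d) (l.foldl pvStepB e) := by
  induction l generalizing d e with
  | nil => exact h
  | cons x t ih => exact ih _ _ (pvStep_inv x h)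

theorem pvValues_filterMap (items : List (String × List (List String)))
    (hne : ∀ p ∈ items, p.2 ≠ []) :
    (items.map (fun p => p.2)).filterMap (fun group => PySem.List.max? group pvKey4)
      = items.map (fun p => pvBest p.2) := by
  induction items with
  | nil => rfl
  | cons p t ih =>
    simp only [List.map_cons, List.filterMap_cons,
      pvMax?_eq_best (hne p (List.mem_cons_self)), ih (fun q hq => hne q (List.mem_cons_of_mem _ hq))]

-- ===== VERDICT (by name: the statement is the Claim_ definition above) =====
theorem remove_duplicate_hypos_spec : Claim_equal_remove_duplicate_hypos := by
  intro l _ _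
  unfold Spec_remove_duplicate_hypos
  have hfoldA : remove_duplicate_hypos l = (l.foldl pvStepA PySem.Dict.empty).values := by
    rfl
  have hfoldB : remove_duplicate_hypos_alt l
      = (l.foldl pvStepB PySem.Dict.empty).values.filterMap
          (fun group => PySem.List.max? group pvKey4) := by
    rfl
  have hinv := pvFold_inv l PySem.Dict.empty PySem.Dict.empty
    ⟨by simp, by simp [PySem.Dict.empty], by simp [PySem.Dict.empty]⟩
  obtain ⟨_, hne, hit⟩ := hinv
  rw [hfoldA, hfoldB]
  show (l.foldl pvStepA PySem.Dict.empty).items.map (fun p => p.2)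
      = ((l.foldl pvStepB PySem.Dict.empty).items.map (fun p => p.2)).filterMap
          (fun group => PySem.List.max? group pvKey4)
  rw [pvValues_filterMap _ hne, hit, List.map_map]
  rfl
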